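-- pv_equiv track=rewrite | github.com/mathistibbe/maze_runner | maze_runner/pathfinding.py | reduce_path_to_straights
-- ===== SOURCE A (Python) =====
-- def reduce_path_to_straights(path):
--     """
--     Reduces a path of grid indices to only the points where the direction changes.
--     Keeps the start, end, and all "corners".
--     Args:
--         path (list of (x, y)): The original path as a list of grid indices.
--     Returns:
--         list of (x, y): Reduced path with only waypoints at direction changes.
--     """
--     if not path or len(path) < 2:
--         return path
--
--     reduced = [path[0]]
--     prev_dx = path[1][0] - path[0][0]
--     prev_dy = path[1][1] - path[0][1]
--
--     for i in range(2, len(path)):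
--         dx = path[i][0] - path[i-1][0]
--         dy = path[i][1] - path[i-1][1]
--         if (dx, dy) != (prev_dx, prev_dy):
--             reduced.append(path[i-1])
--         prev_dx, prev_dy = dx, dy
--
--     reduced.append(path[-1])
--     return reduced
-- ===== SOURCE B (Python) =====
-- def reduce_path_to_straights(path):
--     """Reduce a path to start, direction-change corners, and end by skipping
--     maximal straight runs: each outer step jumps the pointer to the end of the
--     current run and records that point."""
--     if not path or len(path) < 2:
--         return path
--     n = len(path)
--     out = [path[0]]
--     i = 0
--     while i < n - 1:
--         dx = path[i + 1][0] - path[i][0]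
--         dy = path[i + 1][1] - path[i][1]
--         j = i + 1
--         while j < n - 1 and (path[j + 1][0] - path[j][0], path[j + 1][1] - path[j][1]) == (dx, dy):
--             j += 1
--         out.append(path[j])
--         i = j
--     return out
-- ===== Notes on version B (the rewrite author's own statement) =====
-- stated objective: alternative
-- what changed: Replaced A's single pass that compares each step's delta with a running previous delta by a run-skipping two-level pointer loop: the outer loop fixes the current run's direction and the inner loop advances the pointer to the end of that maximal straight run, recording only run endpoints.
import Mathlib
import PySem

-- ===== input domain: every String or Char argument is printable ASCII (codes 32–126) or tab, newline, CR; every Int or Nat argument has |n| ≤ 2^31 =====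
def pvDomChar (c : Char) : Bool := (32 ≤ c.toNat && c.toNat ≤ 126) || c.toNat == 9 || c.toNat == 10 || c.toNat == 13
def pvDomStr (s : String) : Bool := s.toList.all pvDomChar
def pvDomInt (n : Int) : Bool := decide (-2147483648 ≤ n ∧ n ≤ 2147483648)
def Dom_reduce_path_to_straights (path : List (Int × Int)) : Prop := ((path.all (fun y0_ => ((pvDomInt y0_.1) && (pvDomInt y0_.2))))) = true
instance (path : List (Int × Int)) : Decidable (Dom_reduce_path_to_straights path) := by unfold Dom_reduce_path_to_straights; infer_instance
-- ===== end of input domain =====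

-- B replaces A's single stateful previous-delta pass by a run-skipping two-level
-- pointer loop (outer loop per straight run, inner loop to its end); objective:
-- alternative decomposition, same cost.

-- ===== PORT A =====
def reduce_path_to_straights (path : List (Int × Int)) : List (Int × Int) :=
  if path = [] ∨ PySem.List.len path < 2 then path
  else
    let p0 := PySem.List.pyGetD path 0 (0, 0)
    let p1 := PySem.List.pyGetD path 1 (0, 0)
    let st := (PySem.List.pyRange 2 (PySem.List.len path)).foldl
      (fun (st : List (Int × Int) × Int × Int) i =>
        let pi := PySem.List.pyGetD path i (0, 0)
        let pim := PySem.List.pyGetD path (i - 1) (0, 0)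
        let dx := pi.1 - pim.1
        let dy := pi.2 - pim.2
        (if (dx, dy) ≠ (st.2.1, st.2.2) then st.1 ++ [pim] else st.1, dx, dy))
      ([p0], p1.1 - p0.1, p1.2 - p0.2)
    st.1 ++ [PySem.List.pyGetD path (-1) (0, 0)]

-- ===== PORT B =====
-- B's inner while loop: advance j to the end of the maximal run with direction
-- (dx, dy); fuel (≥ remaining steps at every call site) only makes it total
def pvInner (path : List (Int × Int)) (dx dy : Int) : Nat → Nat → Nat
  | 0, j => j
  | fuel + 1, j =>
    if j < path.length - 1 ∧
        ((path.getD (j + 1) (0, 0)).1 - (path.getD j (0, 0)).1,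
         (path.getD (j + 1) (0, 0)).2 - (path.getD j (0, 0)).2) = (dx, dy)
    then pvInner path dx dy fuel (j + 1) else j

-- B's outer while loop (same fuel convention)
def pvOuter (path : List (Int × Int)) : Nat → Nat → List (Int × Int) → List (Int × Int)
  | 0, _, out => out
  | fuel + 1, i, out =>
    if i < path.length - 1 then
      let dx := (path.getD (i + 1) (0, 0)).1 - (path.getD i (0, 0)).1
      let dy := (path.getD (i + 1) (0, 0)).2 - (path.getD i (0, 0)).2
      let j := pvInner path dx dy path.length (i + 1)
      pvOuter path fuel j (out ++ [path.getD j (0, 0)])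
    else out

def reduce_path_to_straights_alt (path : List (Int × Int)) : List (Int × Int) :=
  if path = [] ∨ PySem.List.len path < 2 then path
  else pvOuter path path.length 0 [path.getD 0 (0, 0)]

-- ===== PRECONDITION & SPEC =====
def Spec_reduce_path_to_straights (path : List (Int × Int)) (out : List (Int × Int)) : Prop := out = reduce_path_to_straights_alt path
instance (path : List (Int × Int)) (out : List (Int × Int)) : Decidable (Spec_reduce_path_to_straights path out) := by unfold Spec_reduce_path_to_straights; infer_instance

-- ===== CLAIM (what is proved, stated in full; the proofs are below) =====
def Claim_equal_reduce_path_to_straights : Prop := ∀ (path : List (Int × Int)), Dom_reduce_path_to_straights path → Spec_reduce_path_to_straights path (reduce_path_to_straights path)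

-- ===== LEMMAS AND PROOFS =====

-- interior corner points of the path p :: l, where d is the direction into p
def pvCore (p d : Int × Int) : List (Int × Int) → List (Int × Int)
  | [] => []
  | q :: t =>
    let d' := (q.1 - p.1, q.2 - p.2)
    (if d' ≠ d then [p] else []) ++ pvCore q d' t

-- A's loop body, on a consecutive pair of points instead of an index
def pvStep (st : List (Int × Int) × Int × Int) (pq : (Int × Int) × (Int × Int)) :
    List (Int × Int) × Int × Int :=
  let dx := pq.2.1 - pq.1.1
  let dy := pq.2.2 - pq.1.2
  (if (dx, dy) ≠ (st.2.1, st.2.2) then st.1 ++ [pq.1] else st.1, dx, dy)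

lemma pvIdx (path : List (Int × Int)) : ∀ (m k : Nat) (st : List (Int × Int) × Int × Int),
    1 ≤ k → k + m = path.length →
    (PySem.List.pyRange (k : Int) (PySem.List.len path)).foldl
      (fun (st : List (Int × Int) × Int × Int) i =>
        let pi := PySem.List.pyGetD path i (0, 0)
        let pim := PySem.List.pyGetD path (i - 1) (0, 0)
        let dx := pi.1 - pim.1
        let dy := pi.2 - pim.2
        (if (dx, dy) ≠ (st.2.1, st.2.2) then st.1 ++ [pim] else st.1, dx, dy)) st
    = List.foldl pvStep st ((path.drop (k - 1)).zip (path.drop k)) := by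
  intro m
  induction m with
  | zero =>
    intro k st hk hkm
    have h2 : path.drop k = [] := by
      rw [List.drop_eq_nil_iff]; omega
    rw [show PySem.List.len path = (k : Int) by simp [PySem.List.len]; omega]
    simp [h2, PySem.List.pyRange]
  | succ m ih =>
    intro k st hk hkm
    have hklt : k < path.length := by omega
    have hk1 : k - 1 < path.length := by omega
    have hlen : PySem.List.len path = (path.length : Int) := by simp [PySem.List.len]
    rw [hlen, PySem.List.pyRange_one_cons (by exact_mod_cast hklt), List.foldl_cons,
      show ((k : Int) + 1) = ((k + 1 : Nat) : Int) by push_cast; ring, ← hlen,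
      ih (k + 1) _ (by omega) (by omega)]
    have e1 : PySem.List.pyGetD path (↑k) (0, 0) = path[k] := by
      rw [PySem.List.pyGetD_natCast, List.getD_eq_getElem _ _ hklt]
    have e2 : PySem.List.pyGetD path ((k : Int) - 1) (0, 0) = path[k - 1] := by
      rw [show ((k : Int) - 1) = ((k - 1 : Nat) : Int) by omega,
        PySem.List.pyGetD_natCast, List.getD_eq_getElem _ _ hk1]
    rw [List.drop_eq_getElem_cons hk1, Nat.sub_add_cancel hk,
      List.drop_eq_getElem_cons hklt, List.zip_cons_cons, List.foldl_cons]
    simp only [pvStep, e1, e2, Nat.add_sub_cancel]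
    rw [List.drop_eq_getElem_cons hklt]

lemma pvFold_core : ∀ (l : List (Int × Int)) (p : Int × Int) (acc : List (Int × Int)) (dx dy : Int),
    (List.foldl pvStep (acc, dx, dy) ((p :: l).zip l)).1 = acc ++ pvCore p (dx, dy) l := by
  intro l
  induction l with
  | nil => intro p acc dx dy; simp [pvCore]
  | cons q t ih =>
    intro p acc dx dy
    simp only [List.zip_cons_cons, List.foldl_cons, pvStep, pvCore]
    rw [ih]
    split_ifs with h <;> simp

-- list-level view of B's inner loop
def pvSkip (q d : Int × Int) : List (Int × Int) → (Int × Int) × List (Int × Int)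
  | [] => (q, [])
  | x :: t => if (x.1 - q.1, x.2 - q.2) = d then pvSkip x d t else (q, x :: t)

lemma pvSkip_len : ∀ (t : List (Int × Int)) (q d : Int × Int),
    (pvSkip q d t).2.length ≤ t.length := by
  intro t
  induction t with
  | nil => intro q d; simp [pvSkip]
  | cons x t ih =>
    intro q d
    simp only [pvSkip]
    split_ifs with h
    · exact le_trans (ih x d) (Nat.le_succ _)
    · simp

-- list-level view of B's outer loop (run-end sequence of p :: l)
def pvG (p : Int × Int) (l : List (Int × Int)) : List (Int × Int) :=
  match l with
  | [] => []
  | q :: t =>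
    let r := pvSkip q (q.1 - p.1, q.2 - p.2) t
    r.1 :: pvG r.1 r.2
termination_by l.length
decreasing_by
  have := pvSkip_len t q (q.1 - p.1, q.2 - p.2)
  simp only [List.length_cons]
  omega

-- one-step-at-a-time view (direction d is the direction INTO q)
def pvH (q d : Int × Int) : List (Int × Int) → List (Int × Int)
  | [] => [q]
  | x :: t => if (x.1 - q.1, x.2 - q.2) = d then pvH x d t else q :: pvH x (x.1 - q.1, x.2 - q.2) t

lemma pvDrop_getD (path : List (Int × Int)) (j : Nat) (r : Int × Int) (t : List (Int × Int))
    (h : path.drop j = r :: t) : path.getD j (0, 0) = r := by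
  have hj : j < path.length := by
    by_contra hc
    rw [List.drop_eq_nil_iff.2 (by omega)] at h
    simp at h
  have : path[j] = (path.drop j)[0]'(by simp [h]) := by
    simp [List.getElem_drop]
  rw [List.getD_eq_getElem _ _ hj, this]
  simp [h]

lemma pvInner_spec (path : List (Int × Int)) : ∀ (t : List (Int × Int)) (j : Nat) (q : Int × Int)
    (dx dy : Int) (fuel : Nat), t.length ≤ fuel → path.drop j = q :: t →
    path.drop (pvInner path dx dy fuel j) =
      (pvSkip q (dx, dy) t).1 :: (pvSkip q (dx, dy) t).2 := by
  intro t
  induction t with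
  | nil =>
    intro j q dx dy fuel _ h
    have hlen : path.length = j + 1 := by
      have := congrArg List.length h
      simp at this; omega
    match fuel with
    | 0 => simpa [pvSkip, pvInner] using h
    | f + 1 =>
      unfold pvInner
      rw [if_neg (by omega)]
      simpa [pvSkip] using h
  | cons x t2 ih =>
    intro j q dx dy fuel hf h
    match fuel with
    | 0 => simp at hf
    | f + 1 =>
      have hlen : path.length = j + (t2.length + 2) := by
        have := congrArg List.length h
        simp at this; omega
      have hdj1 : path.drop (j + 1) = x :: t2 := by
        have : path.drop (j + 1) = (path.drop j).drop 1 := by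
          rw [List.drop_drop]
        rw [this, h]; rfl
      have hq : path.getD j (0, 0) = q := pvDrop_getD path j q (x :: t2) h
      have hx : path.getD (j + 1) (0, 0) = x := pvDrop_getD path (j + 1) x t2 hdj1
      unfold pvInner
      by_cases hd : (x.1 - q.1, x.2 - q.2) = (dx, dy)
      · rw [if_pos (by constructor; omega; rw [hq, hx]; exact hd)]
        rw [ih (j + 1) x dx dy f (by simp at hf; omega) hdj1]
        simp [pvSkip, hd]
      · rw [if_neg (by rw [hq, hx]; intro hc; exact hd hc.2)]
        simp [pvSkip, hd, h]

lemma pvOuter_spec (path : List (Int × Int)) : ∀ (n : Nat) (l : List (Int × Int)) (i : Nat)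
    (p : Int × Int) (out : List (Int × Int)) (fuel : Nat), l.length ≤ n → l.length ≤ fuel →
    path.drop i = p :: l → pvOuter path fuel i out = out ++ pvG p l := by
  intro n
  induction n with
  | zero =>
    intro l i p out fuel hn _ h
    have hl : l = [] := List.eq_nil_of_length_eq_zero (by omega)
    subst hl
    have hlen : path.length = i + 1 := by
      have := congrArg List.length h; simp at this; omega
    match fuel with
    | 0 => simp [pvOuter, pvG]
    | f + 1 =>
      unfold pvOuter
      rw [if_neg (by omega)]
      simp [pvG]
  | succ n ih =>
    intro l i p out fuel hn hf h
    match l with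
    | [] =>
      have hlen : path.length = i + 1 := by
        have := congrArg List.length h; simp at this; omega
      match fuel with
      | 0 => simp [pvOuter, pvG]
      | f + 1 =>
        unfold pvOuter
        rw [if_neg (by omega)]
        simp [pvG]
    | q :: t =>
      match fuel with
      | 0 => simp at hf
      | f + 1 =>
        have hlen : path.length = i + (t.length + 2) := by
          have := congrArg List.length h; simp at this; omega
        have hdi1 : path.drop (i + 1) = q :: t := by
          have : path.drop (i + 1) = (path.drop i).drop 1 := by rw [List.drop_drop]
          rw [this, h]; rfl
        have hp : path.getD i (0, 0) = p := pvDrop_getD path i p (q :: t) h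
        have hq : path.getD (i + 1) (0, 0) = q := pvDrop_getD path (i + 1) q t hdi1
        unfold pvOuter
        rw [if_pos (by omega)]
        simp only [hp, hq]
        set d : Int × Int := (q.1 - p.1, q.2 - p.2) with hd
        have hskip := pvInner_spec path t (i + 1) q d.1 d.2 path.length (by omega) hdi1
        have hrt := pvSkip_len t q (d.1, d.2)
        have hr : path.getD (pvInner path d.1 d.2 path.length (i + 1)) (0, 0) =
            (pvSkip q (d.1, d.2) t).1 := pvDrop_getD path _ _ _ hskip
        rw [hr, ih (pvSkip q (d.1, d.2) t).2 _ (pvSkip q (d.1, d.2) t).1 _ f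
          (by simp at hn; omega) (by simp at hf; omega) hskip]
        simp [pvG, ← hd]

lemma pvG_eq_pvH : ∀ (n : Nat) (t : List (Int × Int)) (q d : Int × Int), t.length ≤ n →
    (pvSkip q d t).1 :: pvG (pvSkip q d t).1 (pvSkip q d t).2 = pvH q d t := by
  intro n
  induction n with
  | zero =>
    intro t q d hn
    have : t = [] := List.eq_nil_of_length_eq_zero (by omega)
    subst this
    simp [pvSkip, pvG, pvH]
  | succ n ih =>
    intro t q d hn
    match t with
    | [] => simp [pvSkip, pvG, pvH]
    | x :: t2 =>
      simp only [pvSkip, pvH]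
      by_cases hd : (x.1 - q.1, x.2 - q.2) = d
      · rw [if_pos hd, if_pos hd]
        exact ih t2 x d (by simp at hn; omega)
      · rw [if_neg hd, if_neg hd]
        simp only [pvG]
        rw [ih t2 x (x.1 - q.1, x.2 - q.2) (by simp at hn; omega)]

lemma pvH_core : ∀ (t : List (Int × Int)) (q d : Int × Int),
    pvH q d t = pvCore q d t ++ [t.getLastD q] := by
  intro t
  induction t with
  | nil => intro q d; simp [pvH, pvCore]
  | cons x t2 ih =>
    intro q d
    simp only [pvH, pvCore]
    by_cases hd : (x.1 - q.1, x.2 - q.2) = d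
    · rw [if_pos hd, ih, hd]
      rw [show t2.getLastD x = (x :: t2).getLastD q by cases t2 <;> rfl]
      simp
    · rw [if_neg hd, ih]
      rw [show t2.getLastD x = (x :: t2).getLastD q by cases t2 <;> rfl]
      simp [hd]

-- ===== VERDICT (by name: the statement is the Claim_ definition above) =====
theorem reduce_path_to_straights_spec : Claim_equal_reduce_path_to_straights := by
  unfold Claim_equal_reduce_path_to_straights Spec_reduce_path_to_straights
  intro path _
  match path with
  | [] => rfl
  | [a] => simp [reduce_path_to_straights, reduce_path_to_straights_alt, PySem.List.len]
  | a :: b :: rest =>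
    unfold reduce_path_to_straights reduce_path_to_straights_alt
    have hg : ¬((a :: b :: rest) = [] ∨ PySem.List.len (a :: b :: rest) < 2) := by
      simp [PySem.List.len]
    rw [if_neg hg, if_neg hg]
    have e0 : PySem.List.pyGetD (a :: b :: rest) 0 (0, 0) = a := by
      rw [PySem.List.pyGetD_ofNat']; rfl
    have e1 : PySem.List.pyGetD (a :: b :: rest) 1 (0, 0) = b := by
      rw [PySem.List.pyGetD_ofNat']; rfl
    have hlast : PySem.List.pyGetD (a :: b :: rest) (-1) (0, 0) = rest.getLastD b := by
      rw [PySem.List.pyGetD_neg_one (xs := a :: b :: rest) (d := (0, 0)) (by simp)]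
      simp [List.getLast_eq_getLastD]
    have hidx := pvIdx (a :: b :: rest) rest.length 2 ([a], b.1 - a.1, b.2 - a.2)
      (by omega) (by simp; omega)
    rw [show ((2 : Nat) : Int) = (2 : Int) by norm_num] at hidx
    simp only [] at hidx ⊢
    rw [e0, e1, hlast, hidx,
      show List.drop 1 (a :: b :: rest) = b :: rest from rfl,
      show List.drop 2 (a :: b :: rest) = rest from rfl,
      pvFold_core rest b [a] (b.1 - a.1) (b.2 - a.2),
      pvOuter_spec (a :: b :: rest) (b :: rest).length (b :: rest) 0 a _ (a :: b :: rest).length (le_refl _) (by simp) rfl,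
      show (a :: b :: rest).getD 0 (0, 0) = a from rfl]
    simp only [pvG]
    rw [pvG_eq_pvH rest.length rest b (b.1 - a.1, b.2 - a.2) (le_refl _), pvH_core]
    simp
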